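-- pv_equiv track=rewrite | github.com/raulfauste/DAA | Practica3/SubcoleccionesDivisor.py | genera_subconjuntos
-- ===== SOURCE A (Python) =====
-- def genera_subconjuntos(i,j,sol,elementos,m):
--     if i == m:
--         return 1
--     elif i>m:
--         return 0
--     else:
--         ans = 0
--         for k in range(j+1,len(elementos)):
--             if (i>=1 and elementos[k]%elementos[sol[0]]==0) or i==0:
--                 sol[i]=k
--                 ans = ans + genera_subconjuntos(i+1,k,sol,elementos,m)
--         return ans
-- ===== SOURCE B (Python) =====
-- def _comb(n, r):
--     # binomial coefficient C(n, r) by the incremental exact-division product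
--     if r < 0 or r > n:
--         return 0
--     out = 1
--     for t in range(r):
--         out = out * (n - t) // (t + 1)
--     return out
--
--
-- def genera_subconjuntos(i, j, sol, elementos, m):
--     # Closed-form count: never enumerates the subsets.  Unlike A, it does not
--     # mutate sol (equivalence is about the return value only).
--     if i == m:
--         return 1
--     if i > m or i < 0:
--         return 0
--     n = len(elementos)
--     if j + 1 >= n:
--         return 0
--     if i >= 1:
--         d = elementos[sol[0]]
--         c = sum(1 for k in range(j + 1, n) if elementos[k] % d == 0)
--         return _comb(c, m - i)
--     # i == 0: choose the first index p, then m-1 multiples of elementos[p] after it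
--     if m == 1:
--         return n - (j + 1)
--     total = 0
--     for p in range(j + 1, n):
--         c = sum(1 for k in range(p + 1, n) if elementos[k] % elementos[p] == 0)
--         total += _comb(c, m - 1)
--     return total
-- ===== Notes on version B (the rewrite author's own statement) =====
-- stated objective: alternative
-- what changed: B replaces A's recursive enumeration of every m-subset by a closed-form count: for each candidate first index p it counts the later multiples of elementos[p] and adds C(count, m-1) (a binomial coefficient computed by the incremental exact-division product), and a call deeper in the recursion (i>=1) is a single binomial C(count, m-i).
import Mathlib
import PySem

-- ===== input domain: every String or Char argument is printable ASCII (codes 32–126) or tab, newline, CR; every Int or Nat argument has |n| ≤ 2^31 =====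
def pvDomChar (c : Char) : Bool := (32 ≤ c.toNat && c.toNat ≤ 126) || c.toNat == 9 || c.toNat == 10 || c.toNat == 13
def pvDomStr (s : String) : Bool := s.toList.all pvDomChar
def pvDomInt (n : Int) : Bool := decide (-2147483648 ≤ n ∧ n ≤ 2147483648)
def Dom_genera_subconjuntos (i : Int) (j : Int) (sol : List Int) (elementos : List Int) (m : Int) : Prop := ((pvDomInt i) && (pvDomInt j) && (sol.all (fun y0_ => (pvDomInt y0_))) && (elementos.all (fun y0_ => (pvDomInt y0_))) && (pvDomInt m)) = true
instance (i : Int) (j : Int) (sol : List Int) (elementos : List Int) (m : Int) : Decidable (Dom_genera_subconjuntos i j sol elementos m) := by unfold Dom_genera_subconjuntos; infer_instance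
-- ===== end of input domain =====

-- B replaces A's exponential enumeration of the subsets by a closed-form binomial count
-- (per first index p: C(#multiples after p, m-1)); A mutates sol in place, B does not —
-- the equivalence proved here is about the return value only.

-- ===== PORT A =====
def genera_subconjuntos (i : Int) (j : Int) (sol : List Int) (elementos : List Int) (m : Int) : Int :=
  if i = m then 1
  else if m < i then 0
  else
    ((PySem.List.pyRange (j+1) (elementos.length : Int) 1).foldl
      (fun (st : Int × List Int) k =>
        if (1 ≤ i ∧ PySem.Int.mod (PySem.List.pyGetD elementos k 0)
              (PySem.List.pyGetD elementos (PySem.List.pyGetD st.2 0 0) 0) = 0) ∨ i = 0 then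
          (st.1 + genera_subconjuntos (i+1) k (PySem.List.pySetD st.2 i k) elementos m,
           PySem.List.pySetD st.2 i k)
        else st)
      ((0 : Int), sol)).1
termination_by (m - i).toNat
decreasing_by omega

-- ===== PORT B =====
-- count of positions k in range(a, len(elementos)) with elementos[k] % d == 0
def pvCnt (elementos : List Int) (d : Int) (a : Int) : Int :=
  (((PySem.List.pyRange a (elementos.length : Int) 1).countP
    (fun k => PySem.Int.mod (PySem.List.pyGetD elementos k 0) d == 0) : Nat) : Int)

-- _comb of Source B: binomial coefficient by the incremental exact-division product
def pvComb (n : Int) (r : Int) : Int :=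
  if r < 0 ∨ n < r then 0
  else (PySem.List.pyRange 0 r 1).foldl
    (fun out t => PySem.Int.floordiv (out * (n - t)) (t + 1)) 1

def genera_subconjuntos_alt (i : Int) (j : Int) (sol : List Int) (elementos : List Int) (m : Int) : Int :=
  if i = m then 1
  else if m < i ∨ i < 0 then 0
  else if (elementos.length : Int) ≤ j + 1 then 0
  else if 1 ≤ i then
    pvComb (pvCnt elementos (PySem.List.pyGetD elementos (PySem.List.pyGetD sol 0 0) 0) (j+1)) (m - i)
  else if m = 1 then (elementos.length : Int) - (j + 1)
  else
    (PySem.List.pyRange (j+1) (elementos.length : Int) 1).foldl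
      (fun total p =>
        total + pvComb (pvCnt elementos (PySem.List.pyGetD elementos p 0) (p+1)) (m-1)) 0

-- ===== PRECONDITION & SPEC =====
-- Pre_ holds exactly where Python A returns normally: it excludes only the inputs on which A
-- raises (IndexError reading sol[0] or indexing elementos out of range, IndexError on the
-- write sol[i]=k when the recursion reaches a slot ≥ len(sol), and ZeroDivisionError when
-- the divisor element is 0 while the corresponding inner loop is nonempty).
def Pre_genera_subconjuntos (i : Int) (j : Int) (sol : List Int) (elementos : List Int) (m : Int) : Prop :=
  i = m ∨ m < i ∨ i < 0 ∨ (elementos.length : Int) ≤ j + 1 ∨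
  (1 ≤ i ∧ sol ≠ [] ∧ -(elementos.length : Int) ≤ j + 1 ∧
    -(elementos.length : Int) ≤ PySem.List.pyGetD sol 0 0 ∧
    PySem.List.pyGetD sol 0 0 < (elementos.length : Int) ∧
    PySem.List.pyGetD elementos (PySem.List.pyGetD sol 0 0) 0 ≠ 0 ∧
    (1 ≤ pvCnt elementos (PySem.List.pyGetD elementos (PySem.List.pyGetD sol 0 0) 0) (j+1) →
      min (m-1) (i + pvCnt elementos (PySem.List.pyGetD elementos (PySem.List.pyGetD sol 0 0) 0) (j+1) - 1)
        < (sol.length : Int))) ∨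
  (i = 0 ∧ sol ≠ [] ∧
    (m = 1 ∨
      ∀ p ∈ PySem.List.pyRange (j+1) (elementos.length : Int) 1,
        (elementos.length : Int) ≤ p + 1 ∨
        (-(elementos.length : Int) ≤ p ∧ PySem.List.pyGetD elementos p 0 ≠ 0 ∧
          (1 ≤ pvCnt elementos (PySem.List.pyGetD elementos p 0) (p+1) →
            min (m-1) (pvCnt elementos (PySem.List.pyGetD elementos p 0) (p+1)) < (sol.length : Int)))))
instance (i : Int) (j : Int) (sol : List Int) (elementos : List Int) (m : Int) : Decidable (Pre_genera_subconjuntos i j sol elementos m) := by unfold Pre_genera_subconjuntos; infer_instance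

def pvWitness_genera_subconjuntos : Int × Int × List Int × List Int × Int := (0, -1, [0, 0], [2, 4, 6], 2)

def Spec_genera_subconjuntos (i : Int) (j : Int) (sol : List Int) (elementos : List Int) (m : Int) (out : Int) : Prop := out = genera_subconjuntos_alt i j sol elementos m
instance (i : Int) (j : Int) (sol : List Int) (elementos : List Int) (m : Int) (out : Int) : Decidable (Spec_genera_subconjuntos i j sol elementos m out) := by unfold Spec_genera_subconjuntos; infer_instance

-- ===== CLAIM (what is proved, stated in full; the proofs are below) =====
def Claim_equal_genera_subconjuntos : Prop := ∀ (i : Int) (j : Int) (sol : List Int) (elementos : List Int) (m : Int), Dom_genera_subconjuntos i j sol elementos m → Pre_genera_subconjuntos i j sol elementos m → Spec_genera_subconjuntos i j sol elementos m (genera_subconjuntos i j sol elementos m)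

-- ===== LEMMAS AND PROOFS =====

theorem pvCombFold (a : ℕ) : ∀ (b : ℕ), b ≤ a →
    (PySem.List.pyRange 0 (b : Int) 1).foldl
      (fun out t => PySem.Int.floordiv (out * ((a : Int) - t)) (t + 1)) 1 = (a.choose b : Int) := by
  intro b
  induction b with
  | zero => intro _; rw [PySem.List.pyRange_one_eq_nil (by omega)]; simp
  | succ b ih =>
    intro h
    have hb : b ≤ a := by omega
    have hcast : ((b + 1 : ℕ) : Int) = (b : Int) + 1 := by push_cast; ring
    rw [hcast, PySem.List.pyRange_one_succ_right (by positivity), List.foldl_append, ih hb]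
    simp only [List.foldl_cons, List.foldl_nil]
    have hab : (a : Int) - (b : Int) = ((a - b : ℕ) : Int) := by omega
    rw [hab]
    have h1 : (a.choose b : Int) * ((a - b : ℕ) : Int) = ((a.choose (b+1) * (b+1) : ℕ) : Int) := by
      norm_cast
      exact (Nat.choose_succ_right_eq a b).symm
    rw [h1]
    have h2 : ((b : Int) + 1) = ((b + 1 : ℕ) : Int) := by push_cast; ring
    rw [h2, PySem.Int.floordiv_natCast]
    norm_num

theorem pvComb_natCast (a b : ℕ) : pvComb (a : Int) (b : Int) = (a.choose b : Int) := by
  unfold pvComb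
  by_cases h : a < b
  · rw [if_pos (Or.inr (by exact_mod_cast h)), Nat.choose_eq_zero_of_lt h]; simp
  · rw [if_neg (by push Not; constructor <;> [positivity; exact_mod_cast not_lt.mp h])]
    exact pvCombFold a b (not_lt.mp h)

theorem pvComb_cast_zero (c : Int) (hc : 0 ≤ c) : pvComb c 0 = 1 := by
  unfold pvComb
  rw [if_neg (by omega), PySem.List.pyRange_one_eq_nil (by omega)]
  rfl

theorem pvComb_succ (c r : Int) (hc : 0 ≤ c) (hr : 1 ≤ r) :
    pvComb (c + 1) r = pvComb c (r - 1) + pvComb c r := by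
  lift c to ℕ using hc
  lift r to ℕ using (by omega : (0:Int) ≤ r)
  obtain ⟨k, rfl⟩ : ∃ k, r = k + 1 := ⟨r - 1, by omega⟩
  have e1 : (c : Int) + 1 = ((c + 1 : ℕ) : Int) := by push_cast; ring
  have e2 : ((k + 1 : ℕ) : Int) - 1 = ((k : ℕ) : Int) := by push_cast; ring
  rw [e1, e2, pvComb_natCast, pvComb_natCast, pvComb_natCast, Nat.choose_succ_succ]
  push_cast; ring

theorem pvCnt_nonneg (el : List Int) (d a : Int) : 0 ≤ pvCnt el d a := by
  unfold pvCnt; positivity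

theorem pvComb_zero_of_pos (r : Int) (hr : 1 ≤ r) : pvComb 0 r = 0 := by
  unfold pvComb
  rw [if_pos (Or.inr (by omega))]

theorem pvCnt_nil (el : List Int) (d a : Int) (h : (el.length : Int) ≤ a) :
    pvCnt el d a = 0 := by
  unfold pvCnt
  rw [PySem.List.pyRange_one_eq_nil h]
  simp

theorem pvCnt_cons (el : List Int) (d a : Int) (h : a < (el.length : Int)) :
    pvCnt el d a
      = (if PySem.Int.mod (PySem.List.pyGetD el a 0) d = 0 then 1 else 0) + pvCnt el d (a+1) := by
  unfold pvCnt
  rw [PySem.List.pyRange_one_cons h]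
  simp only [List.countP_cons, beq_iff_eq]
  split_ifs with hd <;> push_cast <;> omega

theorem get0_setD_pos (xs : List Int) (i v : Int) (hi : 1 ≤ i) :
    PySem.List.pyGetD (PySem.List.pySetD xs i v) 0 0 = PySem.List.pyGetD xs 0 0 := by
  rw [PySem.List.pySetD_of_nonneg xs v (by omega : (0:Int) ≤ i), PySem.List.pyGetD_zero, PySem.List.pyGetD_zero]
  have h : i.toNat ≠ 0 := by omega
  simp [List.getD, List.getElem?_set_ne h]

theorem get0_setD_zero (xs : List Int) (v : Int) (hxs : xs ≠ []) :
    PySem.List.pyGetD (PySem.List.pySetD xs 0 v) 0 0 = v := by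
  cases xs with
  | nil => exact absurd rfl hxs
  | cons a t =>
    rw [PySem.List.pySetD_of_nonneg (a :: t) v (by omega : (0:Int) ≤ 0)]
    simp [PySem.List.pyGetD_zero]

theorem setD_ne_nil (xs : List Int) (i v : Int) (hxs : xs ≠ []) :
    PySem.List.pySetD xs i v ≠ [] := by
  intro h
  have := PySem.List.length_pySetD (xs := xs) (i := i) (v := v)
  rw [h] at this
  simp at this
  exact hxs (List.length_eq_zero_iff.mp this.symm)

-- the inner loop of A at a level i ≥ 1, with the divisor position idx0 invariant
theorem foldA (el : List Int) (m i idx0 : Int) (hi : 1 ≤ i) (him : i < m)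
    (HIH : ∀ (k : Int) (sc : List Int), PySem.List.pyGetD sc 0 0 = idx0 →
      genera_subconjuntos (i+1) k sc el m
        = pvComb (pvCnt el (PySem.List.pyGetD el idx0 0) (k+1)) (m - (i+1))) :
    ∀ (s : ℕ) (a acc : Int) (sc : List Int), ((el.length : Int) - a).toNat = s →
      PySem.List.pyGetD sc 0 0 = idx0 →
      ((PySem.List.pyRange a (el.length : Int) 1).foldl
        (fun (st : Int × List Int) k =>
          if (1 ≤ i ∧ PySem.Int.mod (PySem.List.pyGetD el k 0)
                (PySem.List.pyGetD el (PySem.List.pyGetD st.2 0 0) 0) = 0) ∨ i = 0 then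
            (st.1 + genera_subconjuntos (i+1) k (PySem.List.pySetD st.2 i k) el m,
             PySem.List.pySetD st.2 i k)
          else st)
        (acc, sc)).1
        = acc + pvComb (pvCnt el (PySem.List.pyGetD el idx0 0) a) (m - i) := by
  intro s
  induction s with
  | zero =>
    intro a acc sc hs hsc
    rw [PySem.List.pyRange_one_eq_nil (by omega)]
    rw [pvCnt_nil el _ a (by omega), pvComb_zero_of_pos _ (by omega)]
    simp
  | succ s ih =>
    intro a acc sc hs hsc
    have ha : a < (el.length : Int) := by omega
    rw [PySem.List.pyRange_one_cons ha, List.foldl_cons]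
    simp only [hsc]
    by_cases hdiv : PySem.Int.mod (PySem.List.pyGetD el a 0) (PySem.List.pyGetD el idx0 0) = 0
    · rw [if_pos (Or.inl ⟨hi, hdiv⟩)]
      rw [ih (a+1) (acc + genera_subconjuntos (i+1) a (PySem.List.pySetD sc i a) el m)
            (PySem.List.pySetD sc i a) (by omega)
            (by rw [get0_setD_pos sc i a hi]; exact hsc)]
      rw [HIH a (PySem.List.pySetD sc i a) (by rw [get0_setD_pos sc i a hi]; exact hsc)]
      rw [pvCnt_cons el _ a ha, if_pos hdiv]
      have hc := pvCnt_nonneg el (PySem.List.pyGetD el idx0 0) (a+1)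
      rw [show (1 : Int) + pvCnt el (PySem.List.pyGetD el idx0 0) (a+1)
            = pvCnt el (PySem.List.pyGetD el idx0 0) (a+1) + 1 from by ring]
      rw [pvComb_succ _ (m - i) hc (by omega)]
      rw [show m - (i+1) = m - i - 1 from by ring]
      ring
    · rw [if_neg (by rintro (⟨_, h⟩ | h); exact hdiv h; omega)]
      rw [ih (a+1) acc sc (by omega) hsc]
      rw [pvCnt_cons el _ a ha, if_neg hdiv]
      ring_nf

-- A at a level i ≥ 1 is the single binomial coefficient B computes
theorem gsA_eq (t : ℕ) : ∀ (i j : Int) (solc el : List Int) (m : Int),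
    (m - i).toNat = t → 1 ≤ i → i ≤ m →
    genera_subconjuntos i j solc el m
      = pvComb (pvCnt el (PySem.List.pyGetD el (PySem.List.pyGetD solc 0 0) 0) (j+1)) (m - i) := by
  induction t with
  | zero =>
    intro i j solc el m ht h1 h2
    have him : i = m := by omega
    rw [genera_subconjuntos, if_pos him, him]
    rw [show m - m = (0:Int) from by ring]
    exact (pvComb_cast_zero _ (pvCnt_nonneg _ _ _)).symm
  | succ t ih =>
    intro i j solc el m ht h1 h2
    have him : i < m := by omega
    rw [genera_subconjuntos, if_neg (by omega), if_neg (by omega)]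
    rw [foldA el m i (PySem.List.pyGetD solc 0 0) h1 him
          (fun k sc hsc => by rw [ih (i+1) k sc el m (by omega) (by omega) (by omega), hsc])
          ((el.length : Int) - (j+1)).toNat (j+1) 0 solc rfl rfl]
    ring

-- the outer loop of A at level 0 is the sum of binomials B computes
theorem fold0 (el : List Int) (m : Int) (hm : 0 < m) :
    ∀ (s : ℕ) (a acc : Int) (sc : List Int), ((el.length : Int) - a).toNat = s → sc ≠ [] →
      ((PySem.List.pyRange a (el.length : Int) 1).foldl
        (fun (st : Int × List Int) k =>
          if (1 ≤ (0:Int) ∧ PySem.Int.mod (PySem.List.pyGetD el k 0)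
                (PySem.List.pyGetD el (PySem.List.pyGetD st.2 0 0) 0) = 0) ∨ (0:Int) = 0 then
            (st.1 + genera_subconjuntos (0+1) k (PySem.List.pySetD st.2 0 k) el m,
             PySem.List.pySetD st.2 0 k)
          else st)
        (acc, sc)).1
        = acc + ((PySem.List.pyRange a (el.length : Int) 1).map
            (fun p => pvComb (pvCnt el (PySem.List.pyGetD el p 0) (p+1)) (m-1))).sum := by
  intro s
  induction s with
  | zero =>
    intro a acc sc hs _
    rw [PySem.List.pyRange_one_eq_nil (by omega)]
    simp
  | succ s ih =>
    intro a acc sc hs hsc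
    have ha : a < (el.length : Int) := by omega
    rw [PySem.List.pyRange_one_cons ha, List.foldl_cons]
    rw [if_pos (Or.inr rfl)]
    rw [ih (a+1) _ (PySem.List.pySetD sc 0 a) (by omega) (setD_ne_nil sc 0 a hsc)]
    rw [show (0:Int) + 1 = 1 from rfl]
    rw [gsA_eq (m - 1).toNat 1 a (PySem.List.pySetD sc 0 a) el m (by omega) le_rfl (by omega)]
    rw [get0_setD_zero sc a hsc]
    rw [List.map_cons, List.sum_cons]
    ring

-- the equivalence, from the weak consequences of Pre_ that the proof actually needs
theorem gs_eq_alt : ∀ (i : Int) (j : Int) (sol : List Int) (elementos : List Int) (m : Int),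
    (i = m ∨ m < i ∨ i < 0 ∨ (elementos.length : Int) ≤ j + 1 ∨ 1 ≤ i ∨ sol ≠ []) →
    genera_subconjuntos i j sol elementos m = genera_subconjuntos_alt i j sol elementos m := by
  intro i j sol el m hpre
  by_cases h1 : i = m
  · rw [genera_subconjuntos, if_pos h1, genera_subconjuntos_alt, if_pos h1]
  · by_cases h2 : m < i
    · rw [genera_subconjuntos, if_neg h1, if_pos h2,
          genera_subconjuntos_alt, if_neg h1, if_pos (Or.inl h2)]
    · have him : i < m := by omega
      by_cases h3 : i < 0
      · rw [genera_subconjuntos, if_neg h1, if_neg h2,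
            genera_subconjuntos_alt, if_neg h1, if_pos (Or.inr h3)]
        rw [PySem.List.foldl_congr_mem _ _ (fun st _ => st) ((0 : Int), sol)
              (fun st k _ => by
                rw [if_neg]
                rintro (⟨hle, _⟩ | h0) <;> omega)]
        rw [PySem.List.foldl_ignore]
      · have h0 : (0:Int) ≤ i := by omega
        by_cases h4 : (el.length : Int) ≤ j + 1
        · rw [genera_subconjuntos, if_neg h1, if_neg h2,
              genera_subconjuntos_alt, if_neg h1, if_neg (by omega), if_pos h4]
          rw [PySem.List.pyRange_one_eq_nil h4]
          rfl
        · by_cases h5 : 1 ≤ i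
          · rw [genera_subconjuntos_alt, if_neg h1, if_neg (by omega), if_neg h4, if_pos h5]
            exact gsA_eq (m - i).toNat i j sol el m rfl h5 (by omega)
          · have hi0 : i = 0 := by omega
            subst hi0
            have hsol : sol ≠ [] := by
              rcases hpre with h|h|h|h|h|h
              · omega
              · omega
              · omega
              · exact absurd h h4
              · omega
              · exact h
            rw [genera_subconjuntos, if_neg h1, if_neg h2]
            rw [fold0 el m (by omega) ((el.length : Int) - (j+1)).toNat (j+1) 0 sol rfl hsol,
                zero_add]
            rw [genera_subconjuntos_alt, if_neg h1, if_neg (by omega), if_neg h4,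
                if_neg (by omega)]
            by_cases hm1 : m = 1
            · rw [if_pos hm1]
              have hone : ∀ p ∈ PySem.List.pyRange (j+1) (el.length : Int) 1,
                  pvComb (pvCnt el (PySem.List.pyGetD el p 0) (p+1)) (m-1) = (1:Int) := by
                intro p _
                rw [show m - 1 = (0:Int) from by omega]
                exact pvComb_cast_zero _ (pvCnt_nonneg el (PySem.List.pyGetD el p 0) (p+1))
              rw [List.map_congr_left hone, PySem.List.sum_map_const_int,
                  PySem.List.length_pyRange_one]
              omega
            · rw [if_neg hm1]
              rw [PySem.List.foldl_add _
                    (fun p => pvComb (pvCnt el (PySem.List.pyGetD el p 0) (p+1)) (m-1)) 0,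
                  zero_add]

-- ===== VERDICT (by name: the statement is the Claim_ definition above) =====
theorem genera_subconjuntos_spec : Claim_equal_genera_subconjuntos := by
  intro i j sol el m _ hpre
  unfold Spec_genera_subconjuntos
  apply gs_eq_alt
  unfold Pre_genera_subconjuntos at hpre
  rcases hpre with h|h|h|h|h|h
  · exact Or.inl h
  · exact Or.inr (Or.inl h)
  · exact Or.inr (Or.inr (Or.inl h))
  · exact Or.inr (Or.inr (Or.inr (Or.inl h)))
  · exact Or.inr (Or.inr (Or.inr (Or.inr (Or.inl h.1))))
  · exact Or.inr (Or.inr (Or.inr (Or.inr (Or.inr h.2.1))))
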